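-- pv_equiv track=rewrite | github.com/Saptha-me/Bindu | bindu/dspy/strategies.py | _extract_key_point
-- ===== SOURCE A (Python) =====
-- def _extract_key_point(text: str, prefix: str = "") -> str:
--     """Extract key point from text (first sentence or truncated).
--
--     Args:
--         text: Full text to extract from
--         prefix: Optional prefix to add
--
--     Returns:
--         Key point string
--     """
--     # Clean whitespace
--     text = " ".join(text.split())
--
--     # Try to get first sentence
--     sentence_end = -1
--     for end_char in ".!?":
--         pos = text.find(end_char)
--         if pos != -1:
--             if sentence_end == -1 or pos < sentence_end:
--                 sentence_end = pos
--
--     if sentence_end != -1 and sentence_end < 100: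
--         key_point = text[:sentence_end + 1]
--     else:
--         # Truncate to reasonable length
--         if len(text) > 80:
--             # Try to break at word boundary
--             key_point = text[:80].rsplit(" ", 1)[0] + "..."
--         else:
--             key_point = text
--
--     if prefix:
--         return f"{prefix}: {key_point}"
--     return key_point
-- ===== SOURCE B (Python) =====
-- def _extract_key_point(text: str, prefix: str = "") -> str:
--     """Extract key point from text (first sentence or truncated)."""
--     text = " ".join(text.split())
--
--     # One fused forward scan with early exit: it finds the first sentence
--     # terminator (only positions < 100 can matter) and, along the way, the
--     # last space among the first 80 characters (the word boundary A's
--     # rsplit would cut at).  A instead runs three full find() scans plus a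
--     # separate rsplit pass over a slice.
--     key_point = None
--     last_space = -1
--     for i, ch in enumerate(text):
--         if i >= 100:
--             break
--         if ch in ".!?":
--             key_point = text[:i + 1]
--             break
--         if ch == " " and i < 80:
--             last_space = i
--
--     if key_point is None:
--         if len(text) > 80:
--             key_point = (text[:80] if last_space == -1 else text[:last_space]) + "..."
--         else:
--             key_point = text
--
--     return f"{prefix}: {key_point}" if prefix else key_point
-- ===== Notes on version B (the rewrite author's own statement) =====
-- stated objective: alternative
-- what changed: B replaces A's staged passes (three full find() scans min-combined with a -1 sentinel, then a separate rsplit pass over text[:80]) by one fused forward scan with early exit that simultaneously finds the first terminator and tracks the last space among the first 80 characters, then assembles the result from that single scan's state.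
import Mathlib
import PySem

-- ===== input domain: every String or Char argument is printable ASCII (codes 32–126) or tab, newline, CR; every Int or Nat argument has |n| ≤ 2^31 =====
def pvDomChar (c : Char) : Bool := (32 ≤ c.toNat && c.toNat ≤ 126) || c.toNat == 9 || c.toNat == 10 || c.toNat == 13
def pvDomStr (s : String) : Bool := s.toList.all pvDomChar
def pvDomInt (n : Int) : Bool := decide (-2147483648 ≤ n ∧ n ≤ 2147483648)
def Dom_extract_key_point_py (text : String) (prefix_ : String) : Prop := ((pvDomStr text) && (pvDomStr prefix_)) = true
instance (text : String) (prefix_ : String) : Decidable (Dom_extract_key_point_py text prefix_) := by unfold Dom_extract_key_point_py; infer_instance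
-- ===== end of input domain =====

-- B replaces A's staged passes (three full find() scans min-combined through a -1 sentinel,
-- then a separate rsplit pass over text[:80]) by ONE fused forward scan with early exit that
-- finds the first terminator and tracks the last space among the first 80 chars (objective: alternative).

-- ===== PORT A =====
-- A's `for end_char in ".!?": pos = text.find(end_char); …` loop, literally as a fold
def aSentenceEnd (t : List Char) : Int :=
  ['.', '!', '?'].foldl (fun se c =>
    let pos := PySem.Chars.find t [c]
    if pos ≠ -1 then (if se = -1 ∨ pos < se then pos else se) else se) (-1)

-- hand port of `cs.rsplit(" ", 1)`: one split at the LAST occurrence of " "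
-- (PySem has no rsplit; exact for maxsplit=1 with a single-char separator)
def pyRsplitSpace1 (cs : List Char) : List (List Char) :=
  if PySem.Chars.rfind cs [' '] = -1 then [cs]
  else [cs.take (PySem.Chars.rfind cs [' ']).toNat, cs.drop ((PySem.Chars.rfind cs [' ']).toNat + 1)]

def extract_key_point_py (text : String) (prefix_ : String) : String :=
  -- text = " ".join(text.split())
  let t : List Char := PySem.Chars.join [' '] (PySem.Chars.split₀ text.toList)
  let sentence_end : Int := aSentenceEnd t
  let key_point : List Char :=
    if sentence_end ≠ -1 ∧ sentence_end < 100 then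
      -- text[:sentence_end + 1]
      PySem.List.slice t none (some (sentence_end + 1))
    else if 80 < t.length then
      -- text[:80].rsplit(" ", 1)[0] + "..."
      (pyRsplitSpace1 (PySem.List.slice t none (some 80))).headD [] ++ ['.', '.', '.']
    else t
  -- f"{prefix}: {key_point}" when prefix is truthy
  if prefix_.toList ≠ [] then String.ofList (prefix_.toList ++ [':', ' '] ++ key_point)
  else String.ofList key_point

-- ===== PORT B =====
-- B's single loop `for i, ch in enumerate(text): if i >= 100: break; if ch in ".!?": …break;
-- if ch == " " and i < 80: last_space = i`: returns (terminator index if hit, last_space)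
def bScan : List Char → Int → Int → Option Int × Int
  | [], _, ls => (none, ls)
  | x :: t, i, ls =>
    if 100 ≤ i then (none, ls)
    else if x = '.' ∨ x = '!' ∨ x = '?' then (some i, ls)
    else bScan t (i + 1) (if x = ' ' ∧ i < 80 then i else ls)

def extract_key_point_py_alt (text : String) (prefix_ : String) : String :=
  -- text = " ".join(text.split())
  let t : List Char := PySem.Chars.join [' '] (PySem.Chars.split₀ text.toList)
  let r := bScan t 0 (-1)
  let key_point : List Char :=
    match r.1 with
    | some i => PySem.List.slice t none (some (i + 1))     -- text[:i+1] at the break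
    | none =>
      if 80 < t.length then
        (if r.2 = -1 then PySem.List.slice t none (some 80)
         else PySem.List.slice t none (some r.2)) ++ ['.', '.', '.']
      else t
  if prefix_.toList ≠ [] then String.ofList (prefix_.toList ++ [':', ' '] ++ key_point)
  else String.ofList key_point

-- ===== PRECONDITION & SPEC =====
def Spec_extract_key_point_py (text : String) (prefix_ : String) (out : String) : Prop := out = extract_key_point_py_alt text prefix_
instance (text : String) (prefix_ : String) (out : String) : Decidable (Spec_extract_key_point_py text prefix_ out) := by unfold Spec_extract_key_point_py; infer_instance

-- ===== CLAIM (what is proved, stated in full; the proofs are below) =====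
def Claim_equal_extract_key_point_py : Prop := ∀ (text : String) (prefix_ : String), Dom_extract_key_point_py text prefix_ → Spec_extract_key_point_py text prefix_ (extract_key_point_py text prefix_)

-- ===== LEMMAS AND PROOFS =====

-- A's min-of-three-finds, characterised structurally

def stepMin (se p : Int) : Int := if p ≠ -1 then (if se = -1 ∨ p < se then p else se) else se

def shiftI (r : Int) : Int := if r = -1 then -1 else r + 1

theorem findGo_nil (c : Char) (k : Nat) : PySem.Chars.find.go [c] [] k = -1 := by
  rw [PySem.Chars.find.go.eq_def]; simp

theorem findGo_cons (c x : Char) (t : List Char) (k : Nat) :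
    PySem.Chars.find.go [c] (x :: t) k =
      if x = c then (k : Int) else PySem.Chars.find.go [c] t (k + 1) := by
  rw [PySem.Chars.find.go.eq_def]
  have hpre : ([c].isPrefixOf (x :: t)) = (c == x) := by simp [List.isPrefixOf]
  by_cases h : x = c
  · simp [h]
  · have h' : ¬(c = x) := fun e => h e.symm
    simp [hpre, h, h']

theorem findGo_shift (c : Char) (t : List Char) (k : Nat) :
    PySem.Chars.find.go [c] t k =
      if PySem.Chars.find.go [c] t 0 = -1 then -1 else PySem.Chars.find.go [c] t 0 + k := by
  induction t generalizing k with
  | nil => simp [findGo_nil]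
  | cons x t ih =>
    rw [findGo_cons, findGo_cons]
    by_cases h : x = c
    · simp [h]
    · have hge : -1 ≤ PySem.Chars.find.go [c] t 0 := PySem.Chars.neg_one_le_find t [c]
      rw [if_neg h, if_neg h, Nat.zero_add, ih (k + 1), ih 1]
      split_ifs <;> (try simp only [false_or, true_or, or_false, or_true, not_true, not_false_iff] at *) <;> (try contradiction) <;> omega

theorem find_single_cons (c x : Char) (t : List Char) :
    PySem.Chars.find (x :: t) [c] =
      if x = c then 0 else shiftI (PySem.Chars.find t [c]) := by
  show PySem.Chars.find.go [c] (x :: t) 0 = _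
  rw [findGo_cons, findGo_shift c t 1]
  rfl

theorem aSE_unfold (t : List Char) :
    aSentenceEnd t =
      stepMin (stepMin (stepMin (-1) (PySem.Chars.find t ['.']))
        (PySem.Chars.find t ['!'])) (PySem.Chars.find t ['?']) := by
  simp only [aSentenceEnd, List.foldl, stepMin]

theorem aSentenceEnd_nil : aSentenceEnd [] = -1 := by
  rw [aSE_unfold]
  show stepMin (stepMin (stepMin (-1) (PySem.Chars.find.go ['.'] [] 0))
    (PySem.Chars.find.go ['!'] [] 0)) (PySem.Chars.find.go ['?'] [] 0) = -1
  rw [findGo_nil, findGo_nil, findGo_nil]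
  rfl

theorem shiftI_ge (r : Int) (h : -1 ≤ r) : -1 ≤ shiftI r := by
  unfold shiftI; split_ifs <;> omega

theorem stepMin_ge (se p : Int) (hse : -1 ≤ se) (hp : -1 ≤ p) : -1 ≤ stepMin se p := by
  unfold stepMin; split_ifs <;> (try simp only [false_or, true_or, or_false, or_true, not_true, not_false_iff] at *) <;> (try contradiction) <;> omega

theorem stepMin_neg1 (p : Int) : stepMin (-1) p = p := by
  unfold stepMin; split_ifs <;> (try simp only [false_or, true_or, or_false, or_true, not_true, not_false_iff] at *) <;> (try contradiction) <;> omega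

theorem stepMin_zero (p : Int) (hp : -1 ≤ p) : stepMin 0 p = 0 := by
  unfold stepMin; split_ifs <;> (try simp only [false_or, true_or, or_false, or_true, not_true, not_false_iff] at *) <;> (try contradiction) <;> omega

theorem stepMin_x_zero (s : Int) (hs : -1 ≤ s) : stepMin (shiftI s) 0 = 0 := by
  unfold stepMin shiftI; split_ifs <;> (try simp only [false_or, true_or, or_false, or_true, not_true, not_false_iff] at *) <;> (try contradiction) <;> omega

theorem stepMin_shift1 (se p : Int) (hse : -1 ≤ se) (hp : -1 ≤ p) :
    stepMin (shiftI se) (shiftI p) = shiftI (stepMin se p) := by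
  unfold stepMin shiftI; split_ifs <;> (try simp only [false_or, true_or, or_false, or_true, not_true, not_false_iff] at *) <;> (try contradiction) <;> omega

theorem stepMin_dot (b c : Int) (hb : -1 ≤ b) (hc : -1 ≤ c) :
    stepMin (stepMin (stepMin (-1) 0) (shiftI b)) (shiftI c) = 0 := by
  rw [stepMin_neg1, stepMin_zero _ (shiftI_ge _ hb), stepMin_zero _ (shiftI_ge _ hc)]

theorem stepMin_bang (a c : Int) (ha : -1 ≤ a) (hc : -1 ≤ c) :
    stepMin (stepMin (stepMin (-1) (shiftI a)) 0) (shiftI c) = 0 := by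
  rw [stepMin_neg1, stepMin_x_zero _ ha, stepMin_zero _ (shiftI_ge _ hc)]

theorem stepMin_q (a b : Int) (ha : -1 ≤ a) (hb : -1 ≤ b) :
    stepMin (stepMin (stepMin (-1) (shiftI a)) (shiftI b)) 0 = 0 := by
  rw [stepMin_neg1, stepMin_shift1 _ _ ha hb, stepMin_x_zero _ (stepMin_ge _ _ ha hb)]

theorem stepMin_shift (a b c : Int) (ha : -1 ≤ a) (hb : -1 ≤ b) (hc : -1 ≤ c) :
    stepMin (stepMin (stepMin (-1) (shiftI a)) (shiftI b)) (shiftI c) =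
      shiftI (stepMin (stepMin (stepMin (-1) a) b) c) := by
  rw [stepMin_neg1, stepMin_neg1, stepMin_shift1 _ _ ha hb,
    stepMin_shift1 _ _ (stepMin_ge _ _ ha hb) hc]

theorem aSentenceEnd_cons (x : Char) (t : List Char) :
    aSentenceEnd (x :: t) =
      if x = '.' ∨ x = '!' ∨ x = '?' then 0 else shiftI (aSentenceEnd t) := by
  have b1 : -1 ≤ PySem.Chars.find t ['.'] := PySem.Chars.neg_one_le_find t ['.']
  have b2 : -1 ≤ PySem.Chars.find t ['!'] := PySem.Chars.neg_one_le_find t ['!']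
  have b3 : -1 ≤ PySem.Chars.find t ['?'] := PySem.Chars.neg_one_le_find t ['?']
  rw [aSE_unfold, aSE_unfold]
  simp only [find_single_cons]
  by_cases h1 : x = '.'
  · subst h1
    simp only [Char.reduceEq, reduceIte, if_true, if_false, true_or, or_true, false_or, or_false]
    exact stepMin_dot _ _ b2 b3
  by_cases h2 : x = '!'
  · subst h2
    simp only [Char.reduceEq, reduceIte, if_true, if_false, true_or, or_true, false_or, or_false]
    exact stepMin_bang _ _ b1 b3
  by_cases h3 : x = '?'
  · subst h3
    simp only [Char.reduceEq, reduceIte, if_true, if_false, true_or, or_true, false_or, or_false]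
    exact stepMin_q _ _ b1 b2
  · rw [if_neg h1, if_neg h2, if_neg h3, if_neg (by tauto : ¬(x = '.' ∨ x = '!' ∨ x = '?'))]
    exact stepMin_shift _ _ _ b1 b2 b3

theorem aSentenceEnd_ge (t : List Char) : -1 ≤ aSentenceEnd t := by
  induction t with
  | nil => rw [aSentenceEnd_nil]
  | cons x t ih => rw [aSentenceEnd_cons]; unfold shiftI; split_ifs <;> (try simp only [false_or, true_or, or_false, or_true, not_true, not_false_iff] at *) <;> (try contradiction) <;> omega

-- rfind on a single-character needle, characterised structurally

theorem rfindGo_zero (s sub : List Char) :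
    PySem.Chars.rfind.go s sub 0 = if sub.isPrefixOf s then 0 else -1 := by
  rw [PySem.Chars.rfind.go.eq_def]

theorem rfindGo_step (s sub : List Char) (j : Nat) :
    PySem.Chars.rfind.go s sub (j + 1) =
      if sub.isPrefixOf (s.drop (j + 1)) then ((j : Int) + 1) else PySem.Chars.rfind.go s sub j := by
  rw [PySem.Chars.rfind.go.eq_def]
  push_cast
  rfl

theorem rfindGo_succ (x c : Char) (t : List Char) (k : Nat) :
    PySem.Chars.rfind.go (x :: t) [c] (k + 1) =
      if PySem.Chars.rfind.go t [c] k = -1 then (if x = c then 0 else -1)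
      else PySem.Chars.rfind.go t [c] k + 1 := by
  induction k with
  | zero =>
    rw [rfindGo_step, rfindGo_zero, rfindGo_zero]
    have hdrop : List.drop 1 (x :: t) = t := rfl
    rw [hdrop]
    by_cases ht : [c].isPrefixOf t
    · rw [if_pos ht, if_pos ht, if_neg (by norm_num)]
      norm_num
    · rw [if_neg ht, if_neg ht, if_pos rfl]
      by_cases hx : x = c
      · have : ([c].isPrefixOf (x :: t)) = true := by simp [List.isPrefixOf, hx]
        rw [this]; simp; exact hx
      · have : ([c].isPrefixOf (x :: t)) = false := by
          simp [List.isPrefixOf]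
          exact fun e => hx e.symm
        rw [this]; simp; exact hx
  | succ k ih =>
    rw [rfindGo_step, rfindGo_step t [c] k]
    have hdrop : List.drop (k + 1 + 1) (x :: t) = List.drop (k + 1) t := by
      simp [List.drop_succ_cons]
    rw [hdrop, ih]
    by_cases hp : [c].isPrefixOf (List.drop (k + 1) t)
    · rw [if_pos hp, if_pos hp, if_neg (by push_cast; omega)]
      push_cast; ring
    · rw [if_neg hp, if_neg hp]

theorem rfind_nil (c : Char) : PySem.Chars.rfind [] [c] = -1 := by
  show PySem.Chars.rfind.go [] [c] 0 = -1
  rw [rfindGo_zero]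
  simp [List.isPrefixOf]

theorem rfind_cons (x c : Char) (t : List Char) :
    PySem.Chars.rfind (x :: t) [c] =
      if PySem.Chars.rfind t [c] = -1 then (if x = c then 0 else -1)
      else PySem.Chars.rfind t [c] + 1 := by
  show PySem.Chars.rfind.go (x :: t) [c] (t.length + 1) = _
  exact rfindGo_succ x c t t.length

theorem rfind_lt_length (c : Char) (t : List Char) :
    PySem.Chars.rfind t [c] < t.length := by
  induction t with
  | nil => rw [rfind_nil]; simp
  | cons x t ih =>
    rw [rfind_cons]
    simp only [List.length_cons]
    split_ifs <;> push_cast <;> omega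

theorem rfind_ge (c : Char) (t : List Char) : -1 ≤ PySem.Chars.rfind t [c] := by
  induction t with
  | nil => rw [rfind_nil]
  | cons x t ih => rw [rfind_cons]; split_ifs <;> omega

-- B's scan, first component: the first terminator index if < 100

theorem bScan_fst (t : List Char) : ∀ (k ls : Int), 0 ≤ k →
    (bScan t k ls).1 =
      if aSentenceEnd t ≠ -1 ∧ aSentenceEnd t + k < 100 then some (aSentenceEnd t + k)
      else none := by
  induction t with
  | nil => intro k ls hk; simp [bScan, aSentenceEnd_nil]
  | cons x t ih =>
    intro k ls hk
    rw [aSentenceEnd_cons]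
    have hge := aSentenceEnd_ge t
    by_cases hx : x = '.' ∨ x = '!' ∨ x = '?'
    · rw [if_pos hx]
      by_cases h100 : (100 : Int) ≤ k
      · show (bScan (x :: t) k ls).1 = _
        unfold bScan
        rw [if_pos h100, if_neg (by omega : ¬((0 : Int) ≠ -1 ∧ 0 + k < 100))]
      · show (bScan (x :: t) k ls).1 = _
        unfold bScan
        rw [if_neg h100, if_pos hx, if_pos ⟨by omega, by omega⟩]
        simp [Int.zero_add]
    · rw [if_neg hx]
      by_cases h100 : (100 : Int) ≤ k
      · show (bScan (x :: t) k ls).1 = _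
        unfold bScan
        rw [if_pos h100]
        rw [if_neg (by unfold shiftI; split_ifs <;> omega)]
      · show (bScan (x :: t) k ls).1 = _
        unfold bScan
        rw [if_neg h100, if_neg hx, ih (k + 1) _ (by omega)]
        by_cases hse : aSentenceEnd t = -1
        · simp [hse, shiftI]
        · have h1 : shiftI (aSentenceEnd t) = aSentenceEnd t + 1 := by
            unfold shiftI; rw [if_neg hse]
          rw [h1]
          by_cases hlt : aSentenceEnd t + (k + 1) < 100
          · rw [if_pos ⟨hse, hlt⟩, if_pos ⟨by omega, by omega⟩]
            congr 1; omega
          · rw [if_neg (by omega), if_neg (by omega)]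

-- B's scan, second component: frozen once the index reaches 80

theorem bScan_snd_frozen (t : List Char) : ∀ (k ls : Int), 80 ≤ k → (bScan t k ls).2 = ls := by
  induction t with
  | nil => intro k ls _; rfl
  | cons x t ih =>
    intro k ls hk
    unfold bScan
    by_cases h100 : (100 : Int) ≤ k
    · rw [if_pos h100]
    · rw [if_neg h100]
      by_cases hx : x = '.' ∨ x = '!' ∨ x = '?'
      · rw [if_pos hx]
      · rw [if_neg hx, if_neg (by omega : ¬(x = ' ' ∧ k < 80))]
        exact ih (k + 1) ls (by omega)

-- what B's last_space tracking computes, as a pure recursion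

def lsp : List Char → Int → Int → Int
  | [], _, ls => ls
  | x :: t, k, ls => if 80 ≤ k then ls else lsp t (k + 1) (if x = ' ' then k else ls)

theorem bScan_snd (t : List Char) : ∀ (k ls : Int), 0 ≤ k → (bScan t k ls).1 = none →
    (bScan t k ls).2 = lsp t k ls := by
  induction t with
  | nil => intro k ls _ _; rfl
  | cons x t ih =>
    intro k ls hk hnone
    unfold bScan at hnone ⊢
    unfold lsp
    by_cases h100 : (100 : Int) ≤ k
    · rw [if_pos h100] at hnone ⊢
      rw [if_pos (by omega : (80 : Int) ≤ k)]
    · rw [if_neg h100] at hnone ⊢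
      by_cases hx : x = '.' ∨ x = '!' ∨ x = '?'
      · rw [if_pos hx] at hnone; exact absurd hnone (by simp)
      · rw [if_neg hx] at hnone ⊢
        by_cases h80 : (80 : Int) ≤ k
        · rw [if_pos h80, if_neg (by omega : ¬(x = ' ' ∧ k < 80))]
          exact bScan_snd_frozen t (k + 1) ls (by omega)
        · rw [if_neg h80]
          have : (if x = ' ' ∧ k < 80 then k else ls) = (if x = ' ' then k else ls) := by
            by_cases hs : x = ' ' <;> simp [hs, (by omega : k < 80)]
          rw [this] at hnone ⊢
          exact ih (k + 1) _ (by omega) hnone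

-- lsp computes rfind of the first (80 − k) characters

theorem lsp_eq (t : List Char) : ∀ (k ls : Int), 0 ≤ k → k ≤ 80 →
    lsp t k ls =
      (if PySem.Chars.rfind (t.take (80 - k).toNat) [' '] = -1 then ls
       else PySem.Chars.rfind (t.take (80 - k).toNat) [' '] + k) := by
  induction t with
  | nil => intro k ls _ _; simp [lsp, rfind_nil]
  | cons x t ih =>
    intro k ls hk h80
    unfold lsp
    by_cases heq : (80 : Int) ≤ k
    · have : (80 - k).toNat = 0 := by omega
      rw [if_pos heq, this]
      simp [rfind_nil]
    · rw [if_neg heq]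
      have htake : (x :: t).take (80 - k).toNat = x :: t.take (80 - (k + 1)).toNat := by
        have h1 : (80 - k).toNat = (80 - (k + 1)).toNat + 1 := by omega
        rw [h1, List.take_succ_cons]
      rw [htake, rfind_cons, ih (k + 1) _ (by omega) (by omega)]
      have hr := rfind_ge ' ' (t.take (80 - (k + 1)).toNat)
      by_cases hrn : PySem.Chars.rfind (t.take (80 - (k + 1)).toNat) [' '] = -1
      · rw [hrn]
        by_cases hs : x = ' ' <;> simp [hs] <;> omega
      · simp only [if_neg hrn]
        rw [if_neg (show ¬(PySem.Chars.rfind (t.take (80 - (k + 1)).toNat) [' '] + 1 = -1) by omega)]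
        omega

-- the rsplit(" ", 1)[0] of A, in closed form
theorem rsplit_head (cs : List Char) :
    (pyRsplitSpace1 cs).headD [] =
      if PySem.Chars.rfind cs [' '] = -1 then cs
      else cs.take (PySem.Chars.rfind cs [' ']).toNat := by
  unfold pyRsplitSpace1
  split_ifs <;> simp

-- the two key_point computations agree
theorem key_eq (t : List Char) :
    (if aSentenceEnd t ≠ -1 ∧ aSentenceEnd t < 100 then
        PySem.List.slice t none (some (aSentenceEnd t + 1))
      else if 80 < t.length then
        (pyRsplitSpace1 (PySem.List.slice t none (some 80))).headD [] ++ ['.', '.', '.']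
      else t)
    =
    (match (bScan t 0 (-1)).1 with
      | some i => PySem.List.slice t none (some (i + 1))
      | none =>
        if 80 < t.length then
          (if (bScan t 0 (-1)).2 = -1 then PySem.List.slice t none (some 80)
           else PySem.List.slice t none (some (bScan t 0 (-1)).2)) ++ ['.', '.', '.']
        else t) := by
  have hge := aSentenceEnd_ge t
  have hslice80 : PySem.List.slice t none (some (80 : Int)) = t.take 80 := by
    rw [PySem.List.slice_to t (by norm_num : (0 : Int) ≤ 80)]
    congr 1
  have hfst := bScan_fst t 0 (-1) le_rfl
  by_cases hc : aSentenceEnd t ≠ -1 ∧ aSentenceEnd t < 100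
  · have h1 : (bScan t 0 (-1)).1 = some (aSentenceEnd t + 0) := by
      rw [hfst, if_pos ⟨hc.1, by omega⟩]
    rw [if_pos hc, h1]
    simp
  · have h1 : (bScan t 0 (-1)).1 = none := by
      rw [hfst, if_neg (by omega : ¬(aSentenceEnd t ≠ -1 ∧ aSentenceEnd t + 0 < 100))]
    rw [if_neg hc, h1]
    show (if 80 < t.length then
        (pyRsplitSpace1 (PySem.List.slice t none (some 80))).headD [] ++ ['.', '.', '.']
      else t)
      = (if 80 < t.length then
        (if (bScan t 0 (-1)).2 = -1 then PySem.List.slice t none (some 80)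
         else PySem.List.slice t none (some ((bScan t 0 (-1)).2))) ++ ['.', '.', '.']
      else t)
    by_cases hlen : 80 < t.length
    · rw [if_pos hlen, if_pos hlen]
      rw [bScan_snd t 0 (-1) le_rfl h1, lsp_eq t 0 (-1) le_rfl (by norm_num)]
      have hn : ((80 : Int) - 0).toNat = 80 := by decide
      rw [hn, rsplit_head, hslice80]
      have hr := rfind_ge ' ' (t.take 80)
      have hrl : PySem.Chars.rfind (t.take 80) [' '] < ((t.take 80).length : Int) :=
        rfind_lt_length ' ' _
      have hrl80 : PySem.Chars.rfind (t.take 80) [' '] < 80 := by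
        have hlt : (t.take 80).length ≤ 80 := List.length_take_le 80 t
        omega
      by_cases hrn : PySem.Chars.rfind (t.take 80) [' '] = -1
      · rw [hrn]
        simp
      · simp only [if_neg hrn]
        rw [if_neg (show ¬(PySem.Chars.rfind (t.take 80) [' '] + 0 = -1) by omega)]
        rw [PySem.List.slice_to t (by omega : (0 : Int) ≤ PySem.Chars.rfind (t.take 80) [' '] + 0)]
        rw [List.take_take]
        have hmin : min (PySem.Chars.rfind (t.take 80) [' ']).toNat 80
            = (PySem.Chars.rfind (t.take 80) [' '] + 0).toNat := by omega
        rw [hmin]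
    · rw [if_neg hlen, if_neg hlen]

-- ===== VERDICT (by name: the statement is the Claim_ definition above) =====
theorem extract_key_point_py_spec : Claim_equal_extract_key_point_py := by
  intro text prefix_ _
  show extract_key_point_py text prefix_ = extract_key_point_py_alt text prefix_
  unfold extract_key_point_py extract_key_point_py_alt
  simp only [key_eq]
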